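-- pv_equiv track=rewrite | github.com/d031182/steel_thread_on_sap | scripts/python/compare_schema_builders.py | _analyze_edges
-- ===== SOURCE A (Python) =====
-- def _analyze_edges(edges: list) -> dict:
--     """Analyze edge types and properties"""
--     analysis = {
--         'total': len(edges),
--         'with_labels': sum(1 for e in edges if e.get('label')),
--         'dashed': sum(1 for e in edges if e.get('dashes')),
--         'arrows': sum(1 for e in edges if e.get('arrows'))
--     }
--     return analysis
-- ===== SOURCE B (Python) =====
-- def _analyze_edges(edges: list) -> dict:
--     """Analyze edge types and properties via a flattened tag multiset."""
--     tags = [k for e in edges for k in ('label', 'dashes', 'arrows') if e.get(k)]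
--     return {'total': len(edges),
--             'with_labels': tags.count('label'),
--             'dashed': tags.count('dashes'),
--             'arrows': tags.count('arrows')}
-- ===== Notes on version B (the rewrite author's own statement) =====
-- stated objective: alternative
-- what changed: B first flattens the edges into one multiset of truthy property tags ('label'/'dashes'/'arrows' per edge) and then reads each counter off that tag list with .count, instead of A's three independent conditional generator-sum passes over the edges.
import Mathlib
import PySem

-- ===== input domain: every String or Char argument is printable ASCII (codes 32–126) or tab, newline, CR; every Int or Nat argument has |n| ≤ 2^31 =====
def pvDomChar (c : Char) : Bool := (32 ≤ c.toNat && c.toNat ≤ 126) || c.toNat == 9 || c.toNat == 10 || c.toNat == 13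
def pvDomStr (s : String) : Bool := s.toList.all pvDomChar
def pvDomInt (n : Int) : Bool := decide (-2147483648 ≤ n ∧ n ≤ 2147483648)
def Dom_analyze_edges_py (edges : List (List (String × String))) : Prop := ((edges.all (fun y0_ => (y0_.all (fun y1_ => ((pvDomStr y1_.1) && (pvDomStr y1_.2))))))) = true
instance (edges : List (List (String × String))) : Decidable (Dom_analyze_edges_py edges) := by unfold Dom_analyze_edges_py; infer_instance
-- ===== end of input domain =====

-- B flattens the edges into one multiset of truthy property tags and reads each counter off it with .count, instead of A's three conditional generator-sum passes; objective: alternative.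

-- ===== PORT A =====
-- e.get(k) is truthy iff the key is present with a non-empty string value (first match in the assoc list, = Python dict lookup).
def edgeTruthy (e : List (String × String)) (k : String) : Bool :=
  match (PySem.Dict.mk e).get? k with
  | some s => s != ""
  | none => false

-- sum(1 for e in edges if e.get(k))
def countTruthy (edges : List (List (String × String))) (k : String) : Int :=
  ((edges.filter (fun e => edgeTruthy e k)).map (fun _ => (1 : Int))).sum

def analyze_edges_py (edges : List (List (String × String))) : List (String × Int) :=
  [("total", (edges.length : Int)),
   ("with_labels", countTruthy edges "label"),
   ("dashed", countTruthy edges "dashes"),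
   ("arrows", countTruthy edges "arrows")]

-- ===== PORT B =====
-- tags = [k for e in edges for k in ('label','dashes','arrows') if e.get(k)]
def edgeTags (edges : List (List (String × String))) : List String :=
  edges.flatMap (fun e => (["label", "dashes", "arrows"]).filter (fun k => edgeTruthy e k))

def analyze_edges_py_alt (edges : List (List (String × String))) : List (String × Int) :=
  let tags := edgeTags edges
  [("total", (edges.length : Int)),
   ("with_labels", (PySem.List.count tags "label" : Int)),
   ("dashed", (PySem.List.count tags "dashes" : Int)),
   ("arrows", (PySem.List.count tags "arrows" : Int))]

-- ===== PRECONDITION & SPEC =====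
def Spec_analyze_edges_py (edges : List (List (String × String))) (out : List (String × Int)) : Prop := out = analyze_edges_py_alt edges
instance (edges : List (List (String × String))) (out : List (String × Int)) : Decidable (Spec_analyze_edges_py edges out) := by unfold Spec_analyze_edges_py; infer_instance

-- ===== CLAIM (what is proved, stated in full; the proofs are below) =====
def Claim_equal_analyze_edges_py : Prop := ∀ (edges : List (List (String × String))), Dom_analyze_edges_py edges → Spec_analyze_edges_py edges (analyze_edges_py edges)

-- ===== LEMMAS AND PROOFS =====
theorem countTruthy_cons (e : List (String × String)) (es : List (List (String × String))) (k : String) :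
    countTruthy (e :: es) k = (if edgeTruthy e k then 1 else 0) + countTruthy es k := by
  simp [countTruthy, List.filter_cons]
  split <;> simp <;> omega

theorem count_tags (edges : List (List (String × String))) (k : String)
    (hk : k = "label" ∨ k = "dashes" ∨ k = "arrows") :
    (PySem.List.count (edgeTags edges) k : Int) = countTruthy edges k := by
  induction edges with
  | nil => simp [edgeTags, PySem.List.count, countTruthy]
  | cons e es ih =>
    have step : (((["label", "dashes", "arrows"]).filter (fun k' => edgeTruthy e k')).count k)
        = (if edgeTruthy e k then 1 else 0) := by
      rcases hk with h | h | h <;> subst h <;>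
        cases hl : edgeTruthy e "label" <;> cases hd : edgeTruthy e "dashes" <;>
        cases ha : edgeTruthy e "arrows" <;>
        simp [List.filter_cons, hl, hd, ha, List.count_cons]
    rw [countTruthy_cons]
    simp only [edgeTags, List.flatMap_cons, PySem.List.count, List.count_append, step] at *
    rw [← ih]
    push_cast
    split <;> ring

-- ===== VERDICT (by name: the statement is the Claim_ definition above) =====
theorem analyze_edges_py_spec : Claim_equal_analyze_edges_py := by
  intro edges _
  unfold Spec_analyze_edges_py analyze_edges_py analyze_edges_py_alt
  have h1 := count_tags edges "label" (Or.inl rfl)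
  have h2 := count_tags edges "dashes" (Or.inr (Or.inl rfl))
  have h3 := count_tags edges "arrows" (Or.inr (Or.inr rfl))
  simp only [PySem.List.count] at h1 h2 h3
  simp [h1, h2, h3]
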